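-- pv_equiv track=rewrite | github.com/Qoraxon/dabbah666-runtime | docs/engine/runtime.py | front_cost
-- ===== SOURCE A (Python) =====
-- _HEAVY_SYMBOLS = ("integrate", "differentiate", "gradient", "determinant", "eigen", "inverse")
--
-- def front_cost(text: str) -> int:
--     raw = " ".join(str(text or "").split())
--     low = raw.lower()
--     score = min(len(raw), 160)
--     score += 3 * sum(raw.count(ch) for ch in "^*/[](),=")
--     score += 2 * (raw.count("(") + raw.count("["))
--     score += 12 * sum(tok in low for tok in _HEAVY_SYMBOLS)
--     if any(tok in low for tok in ("deployment", "reactor", "terminal", "collapse")):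
--         score += 24
--     return int(score)
-- ===== SOURCE B (Python) =====
-- _HEAVY_SYMBOLS = ("integrate", "differentiate", "gradient", "determinant", "eigen", "inverse")
-- _KEYWORDS = ("deployment", "reactor", "terminal", "collapse")
--
-- def front_cost(text: str) -> int:
--     raw = " ".join(str(text or "").split())
--     low = raw.lower()
--     score = min(len(raw), 160)
--     found = set()
--     for i, ch in enumerate(raw):
--         if ch in "^*/]),=":
--             score += 3
--         elif ch in "([":
--             score += 5
--         for tok in _HEAVY_SYMBOLS + _KEYWORDS:
--             if low.startswith(tok, i):
--                 found.add(tok)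
--     score += sum(12 for tok in _HEAVY_SYMBOLS if tok in found)
--     if any(tok in found for tok in _KEYWORDS):
--         score += 24
--     return score
-- ===== Notes on version B (the rewrite author's own statement) =====
-- stated objective: alternative
-- what changed: B replaces A's token-major staged scans (nine .count passes, an open-bracket bonus pass and per-token 'tok in low' tests) by one position-major scan over the normalized string that adds a per-character weight (3, or 5 for an open bracket) and simultaneously collects into a set every token that starts at the current position via startswith, reading off the heavy bonus and the keyword bonus from that set.
import Mathlib
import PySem

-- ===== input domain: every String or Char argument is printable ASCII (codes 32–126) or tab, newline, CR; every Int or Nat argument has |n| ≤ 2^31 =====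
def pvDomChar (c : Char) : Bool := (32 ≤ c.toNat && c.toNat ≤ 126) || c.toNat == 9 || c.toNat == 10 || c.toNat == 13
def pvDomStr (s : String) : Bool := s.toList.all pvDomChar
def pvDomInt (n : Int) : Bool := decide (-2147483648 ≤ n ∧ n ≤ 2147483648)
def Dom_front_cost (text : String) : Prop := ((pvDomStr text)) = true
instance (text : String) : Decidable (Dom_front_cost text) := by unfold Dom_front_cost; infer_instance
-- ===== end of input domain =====

-- B replaces A's token-major substring counting (nine .count scans, two bonus scans and per-token
-- 'tok in low' tests) by ONE position-major scan of the normalized string that weighs each character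
-- and simultaneously collects into a set every token starting at that position (objective: alternative).


-- ===== PORT A =====
def heavySymbolsA : List String :=
  ["integrate", "differentiate", "gradient", "determinant", "eigen", "inverse"]

-- literal transliteration of A; 'str(text or "")' is the identity on a str argument
-- ('' stays '', any other str is truthy and str() of a str is itself)
def front_cost (text : String) : Int :=
  let raw := PySem.Str.join " " (PySem.Str.split₀ text)
  let low := PySem.Str.lower raw
  let score : Int := min (PySem.Str.len raw) 160
  let score := score +
    3 * (("^*/[](),=".toList).map (fun ch => (PySem.Str.count raw (String.ofList [ch]) : Int))).sum
  let score := score + 2 * ((PySem.Str.count raw "(" : Int) + (PySem.Str.count raw "[" : Int))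
  let score := score + 12 * (heavySymbolsA.map (fun tok => if PySem.Str.isIn tok low then (1 : Int) else 0)).sum
  let score := if (["deployment", "reactor", "terminal", "collapse"] : List String).any
      (fun tok => PySem.Str.isIn tok low) then score + 24 else score
  score

-- ===== PORT B =====
def heavyB : List String :=
  ["integrate", "differentiate", "gradient", "determinant", "eigen", "inverse"]

def keywordsB : List String := ["deployment", "reactor", "terminal", "collapse"]

-- _HEAVY_SYMBOLS + _KEYWORDS (Python tuple concatenation)
def allToksB : List String := heavyB ++ keywordsB

-- transliteration of B's single enumerate loop; 'low.startswith(tok, i)' with 0 ≤ i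
-- is exactly startswith on low[i:], ported as startswith on (low.toList.drop i)
def front_cost_alt (text : String) : Int :=
  let raw := PySem.Str.join " " (PySem.Str.split₀ text)
  let low := PySem.Str.lower raw
  let st := (PySem.List.enumerate raw.toList).foldl
      (fun (st : Int × PySem.Set String) p =>
        ((if p.2 ∈ "^*/]),=".toList then st.1 + 3
          else if p.2 ∈ "([".toList then st.1 + 5 else st.1),
         allToksB.foldl (fun f tok =>
            if PySem.Chars.startswith (low.toList.drop p.1.toNat) tok.toList
            then f.add tok else f) st.2))
      (min (PySem.Str.len raw) 160, PySem.Set.empty)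
  let score := st.1 + ((heavyB.filter (fun tok => st.2.contains tok)).map (fun _ => (12 : Int))).sum
  if keywordsB.any (fun tok => st.2.contains tok) then score + 24 else score

-- ===== PRECONDITION & SPEC =====
def Spec_front_cost (text : String) (out : Int) : Prop := out = front_cost_alt text
instance (text : String) (out : Int) : Decidable (Spec_front_cost text out) := by unfold Spec_front_cost; infer_instance

-- ===== CLAIM =====
def Claim_equal_front_cost : Prop := ∀ (text : String), Dom_front_cost text → Spec_front_cost text (front_cost text)

-- ===== LEMMAS AND PROOFS =====

-- counting a single-character substring is counting that character
theorem chars_count_go_singleton (c : Char) (l : List Char) (fuel acc : Nat)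
    (h : l.length ≤ fuel) :
    PySem.Chars.count.go [c] fuel l acc = acc + l.count c := by
  induction l generalizing fuel acc with
  | nil => cases fuel <;> simp [PySem.Chars.count.go]
  | cons x t ih =>
    cases fuel with
    | zero => simp at h
    | succ n =>
      simp only [PySem.Chars.count.go]
      by_cases hx : x = c
      · subst hx
        have hp : ([x].isPrefixOf (x :: t)) = true := by simp [List.isPrefixOf]
        rw [hp]
        simp only [if_true, List.length_cons, List.drop_succ_cons, List.length_nil,
          List.drop_zero]
        rw [ih _ _ (by simpa using h)]
        simp
        omega
      · have hp : ([c].isPrefixOf (x :: t)) = false := by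
          have hdef : ([c].isPrefixOf (x :: t)) = (c == x && List.isPrefixOf [] t) := rfl
          rw [hdef]
          simp [Ne.symm hx]
        rw [hp]
        simp only [Bool.false_eq_true, if_false]
        rw [ih _ _ (by simpa using h)]
        simp [hx]

theorem chars_count_singleton (c : Char) (l : List Char) :
    PySem.Chars.count l [c] = l.count c := by
  simpa using chars_count_go_singleton c l l.length 0 le_rfl

theorem str_count_singleton (s : String) (c : Char) :
    PySem.Str.count s (String.ofList [c]) = s.toList.count c := by
  rw [PySem.Str.count_eq]
  have h : (String.ofList [c]).toList = [c] := by simp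
  rw [h]
  exact chars_count_singleton c s.toList

theorem str_count_char (s sub : String) (c : Char) (h : sub.toList = [c]) :
    PySem.Str.count s sub = s.toList.count c := by
  rw [PySem.Str.count_eq, h]
  exact chars_count_singleton c s.toList

-- a 0/1 indicator sum is a character count
theorem sum_indicator_eq_count (c : Char) (cs : List Char) :
    (cs.map (fun x => if c = x then (1 : Int) else 0)).sum = cs.count c := by
  induction cs with
  | nil => simp
  | cons x t ih =>
    by_cases h : c = x
    · subst h; simp [ih]; omega
    · simp [h, ih, Ne.symm h]

-- per-character weight of B's if-chain
def wB (c : Char) : Int :=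
  if c ∈ "^*/]),=".toList then 3 else if c ∈ "([".toList then 5 else 0

theorem wB_eq (c : Char) :
    wB c =
      3 * (((if '^' = c then 1 else 0) + (if '*' = c then 1 else 0) + (if '/' = c then 1 else 0)
        + (if '[' = c then 1 else 0) + (if ']' = c then 1 else 0) + (if '(' = c then 1 else 0)
        + (if ')' = c then 1 else 0) + (if ',' = c then 1 else 0) + (if '=' = c then 1 else 0) : Int))
      + 2 * ((if '(' = c then 1 else 0) + (if '[' = c then 1 else 0)) := by
  by_cases h1 : '^' = c; · subst h1; decide
  by_cases h2 : '*' = c; · subst h2; decide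
  by_cases h3 : '/' = c; · subst h3; decide
  by_cases h4 : '[' = c; · subst h4; decide
  by_cases h5 : ']' = c; · subst h5; decide
  by_cases h6 : '(' = c; · subst h6; decide
  by_cases h7 : ')' = c; · subst h7; decide
  by_cases h8 : ',' = c; · subst h8; decide
  by_cases h9 : '=' = c; · subst h9; decide
  simp [wB, h1, h2, h3, h4, h5, h6, h7, h8, h9, Ne.symm h1, Ne.symm h2, Ne.symm h3,
    Ne.symm h4, Ne.symm h5, Ne.symm h6, Ne.symm h7, Ne.symm h8, Ne.symm h9]

-- B's weighted pass totals A's count-based passes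
theorem punct_eq (cs : List Char) :
    (cs.map wB).sum =
      3 * (((cs.count '^' : Int)) + (cs.count '*') + (cs.count '/') + (cs.count '[')
        + (cs.count ']') + (cs.count '(') + (cs.count ')') + (cs.count ',') + (cs.count '='))
      + 2 * ((cs.count '(' : Int) + (cs.count '[')) := by
  have hfold : ∀ (k : Int) (c : Char), (cs.map (fun x => if c = x then k else 0)).sum
      = k * (cs.map (fun x => if c = x then (1 : Int) else 0)).sum := by
    intro k c
    rw [← List.sum_map_mul_left]
    simp [mul_ite]
  have h3 := hfold 3
  have h2 := hfold 2
  simp only [funext wB_eq, mul_add, mul_ite, mul_one, mul_zero,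
    PySem.List.sum_map_add_int, h3, h2, sum_indicator_eq_count]

-- A's 12 * sum of indicators equals B's sum of 12 over the filtered list
theorem heavy_eq (p : String → Bool) (l : List String) :
    12 * ((l.map (fun tok => if p tok then (1 : Int) else 0)).sum) =
      ((l.filter p).map (fun _ => (12 : Int))).sum := by
  induction l with
  | nil => simp
  | cons x t ih =>
    by_cases hx : p x <;> simp [hx, mul_add, ih]

-- a fold over enumerate whose step ignores the index is a fold over the list
theorem foldl_enumerate_snd {A S : Type} (h : S -> A -> S) (l : List A) (k : Int) (a : S) :
    (PySem.List.enumerate l k).foldl (fun s p => h s p.2) a = l.foldl h a := by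
  induction l generalizing k a with
  | nil => rfl
  | cons x t ih => simpa [PySem.List.enumerate] using ih (k + 1) (h a x)

-- B's score step is an additive fold
theorem score_fold (l : List Char) (a : Int) :
    l.foldl (fun a ch => if ch ∈ "^*/]),=".toList then a + 3
      else if ch ∈ "([".toList then a + 5 else a) a = a + (l.map wB).sum := by
  have hstep : (fun (a : Int) ch => if ch ∈ "^*/]),=".toList then a + 3
      else if ch ∈ "([".toList then a + 5 else a) = fun a ch => a + wB ch := by
    funext a ch
    unfold wB
    split_ifs <;> simp
  rw [hstep, PySem.List.foldl_add]

-- membership after B's inner token fold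
theorem inner_mem (q : String -> Bool) (toks : List String) (f0 : PySem.Set String)
    (x : String) :
    (x ∈ toks.foldl (fun f tok => if q tok then f.add tok else f) f0) ↔
      x ∈ f0 ∨ (x ∈ toks ∧ q x = true) := by
  induction toks generalizing f0 with
  | nil => simp
  | cons t ts ih =>
    simp only [List.foldl_cons, ih]
    by_cases hq : q t
    · simp only [hq, if_true, PySem.Set.mem_add]
      constructor
      · rintro (⟨h | h⟩ | ⟨h1, h2⟩)
        · exact Or.inl h
        · exact Or.inr ⟨by simp [h], by simp [h, hq]⟩
        · exact Or.inr ⟨List.mem_cons_of_mem _ h1, h2⟩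
      · rintro (h | ⟨h1, h2⟩)
        · exact Or.inl (Or.inl h)
        · rcases List.mem_cons.mp h1 with h | h
          · exact Or.inl (Or.inr h)
          · exact Or.inr ⟨h, h2⟩
    · simp only [hq]
      constructor
      · rintro (h | ⟨h1, h2⟩)
        · exact Or.inl h
        · exact Or.inr ⟨List.mem_cons_of_mem _ h1, h2⟩
      · rintro (h | ⟨h1, h2⟩)
        · exact Or.inl h
        · rcases List.mem_cons.mp h1 with h | h
          · subst h; simp [h2] at hq
          · exact Or.inr ⟨h, h2⟩

-- membership after B's whole position loop
theorem outer_mem (Q : Int -> String -> Bool) (ps : List (Int × Char))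
    (f0 : PySem.Set String) (x : String) :
    (x ∈ ps.foldl (fun f p => allToksB.foldl
        (fun f tok => if Q p.1 tok then f.add tok else f) f) f0) ↔
      x ∈ f0 ∨ (x ∈ allToksB ∧ ∃ p ∈ ps, Q p.1 x = true) := by
  induction ps generalizing f0 with
  | nil => simp
  | cons p ps ih =>
    simp only [List.foldl_cons, ih, inner_mem]
    constructor
    · rintro (⟨h | ⟨h1, h2⟩⟩ | ⟨h1, p', hp', h2⟩)
      · exact Or.inl h
      · exact Or.inr ⟨h1, p, List.mem_cons_self, h2⟩
      · exact Or.inr ⟨h1, p', List.mem_cons_of_mem _ hp', h2⟩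
    · rintro (h | ⟨h1, p', hp', h2⟩)
      · exact Or.inl (Or.inl h)
      · rcases List.mem_cons.mp hp' with h | h
        · subst h; exact Or.inl (Or.inr ⟨h1, h2⟩)
        · exact Or.inr ⟨h1, p', h, h2⟩

-- the first components of enumerate l k are k, k+1, …
theorem exists_enum {A : Type} (l : List A) (k : Int) (hk : 0 ≤ k) (R : Nat -> Prop) :
    (∃ p ∈ PySem.List.enumerate l k, R p.1.toNat) ↔
      ∃ j : Nat, k.toNat ≤ j ∧ j < k.toNat + l.length ∧ R j := by
  induction l generalizing k with
  | nil => simp [PySem.List.enumerate]; omega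
  | cons x t ih =>
    have h1 : (0 : Int) ≤ k + 1 := by omega
    have h2 : (k + 1).toNat = k.toNat + 1 := by omega
    constructor
    · rintro ⟨p, hp, hR⟩
      rcases List.mem_cons.mp hp with h | h
      · subst h; exact ⟨k.toNat, le_rfl, by simp, hR⟩
      · rcases (ih (k + 1) h1).mp ⟨p, h, hR⟩ with ⟨j, hj1, hj2, hj3⟩
        exact ⟨j, by omega, by simp at hj2 ⊢; omega, hj3⟩
    · rintro ⟨j, hj1, hj2, hj3⟩
      by_cases hjk : j = k.toNat
      · subst hjk
        exact ⟨(k, x), List.mem_cons_self, hj3⟩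
      · rcases (ih (k + 1) h1).mpr ⟨j, by omega, by simp at hj2 ⊢; omega, hj3⟩
          with ⟨p, hp, hR⟩
        exact ⟨p, List.mem_cons_of_mem _ hp, hR⟩

-- a bounded startswith scan is substring membership (for nonempty sub)
theorem scan_iff_isIn (sub s : List Char) (hne : sub ≠ []) :
    (∃ j : Nat, j < s.length ∧ PySem.Chars.startswith (s.drop j) sub = true) ↔
      PySem.Chars.isIn sub s = true := by
  rw [← PySem.Chars.exists_prefix_drop_iff_isIn]
  constructor
  · rintro ⟨j, _, h⟩
    exact ⟨j, (PySem.Chars.startswith_iff _ _).mp h⟩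
  · rintro ⟨j, h⟩
    by_cases hj : j < s.length
    · exact ⟨j, hj, (PySem.Chars.startswith_iff _ _).mpr h⟩
    · rw [List.drop_eq_nil_of_le (by omega)] at h
      simp [List.prefix_nil] at h; exact absurd h hne

-- the score fold over enumerate ignores the index
theorem score_fold_enum (l : List Char) (k : Int) (a : Int) :
    (PySem.List.enumerate l k).foldl (fun a p => if p.2 ∈ "^*/]),=".toList then a + 3
      else if p.2 ∈ "([".toList then a + 5 else a) a = a + (l.map wB).sum :=
  (foldl_enumerate_snd (fun a ch => if ch ∈ "^*/]),=".toList then a + 3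
      else if ch ∈ "([".toList then a + 5 else a) l k a).trans (score_fold l a)

-- heavyB is a sublist of allToksB
theorem heavy_sub : ∀ tok ∈ heavyB, tok ∈ allToksB := by decide

-- the pair fold of B splits into a score fold and a found fold
theorem pair_fold (low : List Char) (ps : List (Int × Char)) (a : Int) (b : PySem.Set String) :
    ps.foldl (fun (st : Int × PySem.Set String) p =>
      ((if p.2 ∈ "^*/]),=".toList then st.1 + 3
        else if p.2 ∈ "([".toList then st.1 + 5 else st.1),
       allToksB.foldl (fun f tok =>
          if PySem.Chars.startswith (low.drop p.1.toNat) tok.toList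
          then f.add tok else f) st.2)) (a, b)
    = (ps.foldl (fun a p => if p.2 ∈ "^*/]),=".toList then a + 3
        else if p.2 ∈ "([".toList then a + 5 else a) a,
       ps.foldl (fun f p => allToksB.foldl (fun f tok =>
          if PySem.Chars.startswith (low.drop p.1.toNat) tok.toList
          then f.add tok else f) f) b) :=
  PySem.List.foldl_prod_mk
    (fun a (p : Int × Char) => if p.2 ∈ "^*/]),=".toList then a + 3
      else if p.2 ∈ "([".toList then a + 5 else a)
    (fun b (p : Int × Char) => allToksB.foldl (fun f tok =>
        if PySem.Chars.startswith (low.drop p.1.toNat) tok.toList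
        then f.add tok else f) b) ps a b

-- every token of B's tables is a nonempty member of allToksB
theorem toks_facts : ∀ tok ∈ allToksB, tok.toList ≠ [] := by decide

-- membership in B's found set is substring membership
theorem found_contains (raw : String) (x : String) (hx : x ∈ allToksB) :
    ((PySem.List.enumerate raw.toList).foldl (fun f p => allToksB.foldl (fun f tok =>
        if PySem.Chars.startswith ((PySem.Str.lower raw).toList.drop p.1.toNat) tok.toList
        then f.add tok else f) f) PySem.Set.empty).contains x
      = PySem.Str.isIn x (PySem.Str.lower raw) := by
  have hne : x.toList ≠ [] := toks_facts x hx
  have hlen : (PySem.Chars.lower raw.toList).length = raw.toList.length := by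
    simp [PySem.Chars.lower]
  rw [Bool.eq_iff_iff, PySem.Set.contains_iff]
  have h1 := outer_mem
    (fun i tok => PySem.Chars.startswith ((PySem.Str.lower raw).toList.drop i.toNat) tok.toList)
    (PySem.List.enumerate raw.toList) PySem.Set.empty x
  rw [h1]
  have h2 := exists_enum raw.toList 0 le_rfl
    (fun j => PySem.Chars.startswith ((PySem.Str.lower raw).toList.drop j) x.toList = true)
  simp only [PySem.Set.empty, List.not_mem_nil, false_or, Int.toNat_zero, Nat.zero_add] at h1 h2 ⊢
  rw [h2]
  have h3 := scan_iff_isIn x.toList (PySem.Str.lower raw).toList hne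
  simp only [PySem.Str.toList_lower] at h3 ⊢
  rw [hlen] at h3
  simp only [PySem.Str.isIn_eq, PySem.Str.toList_lower]
  rw [← h3]
  constructor
  · rintro ⟨h, ⟨j, hj1, hj2, hj3⟩⟩; exact ⟨j, hj2, hj3⟩
  · rintro ⟨j, hj1, hj2⟩; exact ⟨hx, j, Nat.zero_le j, hj1, hj2⟩

-- ===== VERDICT =====
theorem front_cost_spec : Claim_equal_front_cost := by
  intro text _
  simp only [Spec_front_cost, front_cost, front_cost_alt]
  generalize (PySem.Str.join " " (PySem.Str.split₀ text)) = raw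
  rw [pair_fold]
  dsimp only
  rw [score_fold_enum]
  rw [List.filter_congr (fun tok htok =>
    found_contains raw tok (heavy_sub tok htok))]
  simp only [keywordsB, List.any_cons, List.any_nil]
  simp only [found_contains _ "deployment" (by decide), found_contains _ "reactor" (by decide),
    found_contains _ "terminal" (by decide), found_contains _ "collapse" (by decide)]
  rw [← heavy_eq, punct_eq]
  generalize (PySem.Str.lower raw) = low
  have hlit : ("^*/[](),=".toList) = ['^', '*', '/', '[', ']', '(', ')', ',', '='] := by decide
  simp only [hlit, List.map_cons, List.map_nil, List.sum_cons, List.sum_nil,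
    str_count_singleton, heavySymbolsA, heavyB]
  rw [str_count_char _ "(" '(' (by decide), str_count_char _ "[" '[' (by decide)]
  split_ifs <;> ring
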